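-- pv_equiv track=rewrite | github.com/AkitaCodingPeasant/CVBackGroundRemover | batch_processing.py | validate_batch_parameters
-- ===== SOURCE A (Python) =====
-- from typing import List, Tuple, Any
--
-- def validate_batch_parameters(parameters: dict, fg_color_blocks: List[Any], bg_color_blocks: List[Any]) -> Tuple[bool, str]:
--     """驗證批量處理參數"""
--
--     # 檢查必要參數
--     required_params = ["channel", "fg_threshold", "bg_threshold", "noise_removal_area", "hole_removal_area", "dilate_size", "erode_size"]
--     for param in required_params:
--         if param not in parameters:
--             return False, f"缺少必要參數: {param}"
--
--     # 檢查顏色方塊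
--     if not fg_color_blocks:
--         return False, "至少需要一個前景顏色"
--
--     if not bg_color_blocks:
--         return False, "至少需要一個背景顏色"
--
--     # 檢查閾值範圍
--     if not (0 <= parameters["fg_threshold"] <= 100):
--         return False, "前景閾值必須在 0-100 範圍內"
--
--     if not (0 <= parameters["bg_threshold"] <= 100):
--         return False, "背景閾值必須在 0-100 範圍內"
--
--     if parameters["fg_threshold"] >= parameters["bg_threshold"]:
--         return False, "前景閾值必須小於背景閾值"
--
--     # 檢查邊緣處理參數範圍
--     if not (0 <= parameters["dilate_size"] <= 20):
--         return False, "擴張大小必須在 0-20 範圍內"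
--
--     if not (0 <= parameters["erode_size"] <= 20):
--         return False, "侵蝕大小必須在 0-20 範圍內"
--
--     return True, "參數驗證通過"
-- ===== SOURCE B (Python) =====
-- def _run_plan(parameters, plan):
--     """Recursive interpreter over a declarative check plan."""
--     if not plan:
--         return True, "參數驗證通過"
--     kind, a, b, msg = plan[0]
--     if kind == "nonempty":
--         ok = len(a) > 0
--     elif kind == "range":
--         ok = 0 <= parameters[a] <= b
--     else:  # "less": parameters[a] < parameters[b]
--         ok = parameters[a] < parameters[b]
--     if not ok:
--         return False, msg
--     return _run_plan(parameters, plan[1:])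
--
--
-- def validate_batch_parameters(parameters, fg_color_blocks, bg_color_blocks):
--     """驗證批量處理參數 — declarative check plan run by a recursive interpreter."""
--     REQUIRED = ["channel", "fg_threshold", "bg_threshold", "noise_removal_area",
--                 "hole_removal_area", "dilate_size", "erode_size"]
--     missing = [p for p in REQUIRED if p not in parameters]
--     if missing:
--         return False, "缺少必要參數: " + missing[0]
--
--     plan = [
--         ("nonempty", fg_color_blocks, None, "至少需要一個前景顏色"),
--         ("nonempty", bg_color_blocks, None, "至少需要一個背景顏色"),
--         ("range", "fg_threshold", 100, "前景閾值必須在 0-100 範圍內"),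
--         ("range", "bg_threshold", 100, "背景閾值必須在 0-100 範圍內"),
--         ("less", "fg_threshold", "bg_threshold", "前景閾值必須小於背景閾值"),
--         ("range", "dilate_size", 20, "擴張大小必須在 0-20 範圍內"),
--         ("range", "erode_size", 20, "侵蝕大小必須在 0-20 範圍內"),
--     ]
--     return _run_plan(parameters, plan)
-- ===== Notes on version B (the rewrite author's own statement) =====
-- stated objective: alternative
-- what changed: B replaces A's straight-line chain of if/return validation branches by a declarative check plan (tagged tuples: nonempty/range/less) executed by a recursive interpreter, and computes missing required params with a comprehension instead of an early-return loop.
import Mathlib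
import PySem

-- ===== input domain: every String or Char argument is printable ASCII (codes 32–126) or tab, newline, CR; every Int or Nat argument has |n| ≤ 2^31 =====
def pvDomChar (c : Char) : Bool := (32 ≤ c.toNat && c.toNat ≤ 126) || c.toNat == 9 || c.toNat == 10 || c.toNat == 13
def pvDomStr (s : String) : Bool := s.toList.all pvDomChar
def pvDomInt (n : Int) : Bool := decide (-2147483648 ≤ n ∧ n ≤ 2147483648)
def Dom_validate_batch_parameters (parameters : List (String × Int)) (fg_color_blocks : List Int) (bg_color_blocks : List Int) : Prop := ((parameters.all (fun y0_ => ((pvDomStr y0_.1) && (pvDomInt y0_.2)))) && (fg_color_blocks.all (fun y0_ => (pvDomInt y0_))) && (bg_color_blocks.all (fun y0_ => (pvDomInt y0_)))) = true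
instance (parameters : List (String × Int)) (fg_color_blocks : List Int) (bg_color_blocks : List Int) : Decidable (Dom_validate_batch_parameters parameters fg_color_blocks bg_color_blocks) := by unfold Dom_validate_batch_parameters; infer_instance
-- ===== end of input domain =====

-- B replaces A's straight-line if/return chain by a declarative check plan executed by a
-- recursive interpreter, with missing required params computed by a filter instead of an
-- early-return loop (alternative decomposition, same cost).


-- ===== PORT A =====
-- dict lookup (first match in the association list); exact for Python's `d[k]` / `k in d`
def pvLookupA (d : List (String × Int)) (k : String) : Option Int :=
  (d.find? (fun p => p.1 == k)).map (·.2)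

-- the `for param in required_params: if param not in parameters: return …` loop of A
def pvRequiredLoopA (d : List (String × Int)) : List String → Option (Bool × String)
  | [] => none
  | p :: rest =>
    if (pvLookupA d p).isNone then some (false, "缺少必要參數: " ++ p)
    else pvRequiredLoopA d rest

def validate_batch_parameters (parameters : List (String × Int)) (fg_color_blocks : List Int) (bg_color_blocks : List Int) : Bool × String :=
  match pvRequiredLoopA parameters ["channel", "fg_threshold", "bg_threshold", "noise_removal_area", "hole_removal_area", "dilate_size", "erode_size"] with
  | some r => r
  | none =>
    if fg_color_blocks.isEmpty then (false, "至少需要一個前景顏色")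
    else if bg_color_blocks.isEmpty then (false, "至少需要一個背景顏色")
    -- the required-params loop guarantees all four keys are present, so `.getD 0` is never the default
    else if ¬ (0 ≤ (pvLookupA parameters "fg_threshold").getD 0 ∧ (pvLookupA parameters "fg_threshold").getD 0 ≤ 100) then (false, "前景閾值必須在 0-100 範圍內")
    else if ¬ (0 ≤ (pvLookupA parameters "bg_threshold").getD 0 ∧ (pvLookupA parameters "bg_threshold").getD 0 ≤ 100) then (false, "背景閾值必須在 0-100 範圍內")
    else if (pvLookupA parameters "fg_threshold").getD 0 ≥ (pvLookupA parameters "bg_threshold").getD 0 then (false, "前景閾值必須小於背景閾值")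
    else if ¬ (0 ≤ (pvLookupA parameters "dilate_size").getD 0 ∧ (pvLookupA parameters "dilate_size").getD 0 ≤ 20) then (false, "擴張大小必須在 0-20 範圍內")
    else if ¬ (0 ≤ (pvLookupA parameters "erode_size").getD 0 ∧ (pvLookupA parameters "erode_size").getD 0 ≤ 20) then (false, "侵蝕大小必須在 0-20 範圍內")
    else (true, "參數驗證通過")

-- ===== PORT B =====
def pvLookupB (d : List (String × Int)) (k : String) : Option Int :=
  (d.find? (fun p => p.1 == k)).map (·.2)

-- one declarative check of B's plan (the tagged 4-tuples of Source B)
inductive PvCheck where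
  | nonempty : List Int → String → PvCheck          -- ("nonempty", lst, None, msg)
  | range : String → Int → String → PvCheck         -- ("range", key, hi, msg): 0 <= parameters[key] <= hi
  | less : String → String → String → PvCheck       -- ("less", k1, k2, msg): parameters[k1] < parameters[k2]
deriving DecidableEq, Repr

-- the recursive interpreter `_run_plan` of Source B
def pvRunPlan (parameters : List (String × Int)) : List PvCheck → Bool × String
  | [] => (true, "參數驗證通過")
  | c :: rest =>
    let ok : Bool :=
      match c with
      | .nonempty a _ => decide (0 < a.length)
      | .range k hi _ => decide (0 ≤ (pvLookupB parameters k).getD 0 ∧ (pvLookupB parameters k).getD 0 ≤ hi)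
      | .less k1 k2 _ => decide ((pvLookupB parameters k1).getD 0 < (pvLookupB parameters k2).getD 0)
    if !ok then
      (false, match c with | .nonempty _ m => m | .range _ _ m => m | .less _ _ m => m)
    else pvRunPlan parameters rest

def validate_batch_parameters_alt (parameters : List (String × Int)) (fg_color_blocks : List Int) (bg_color_blocks : List Int) : Bool × String :=
  let missing := ["channel", "fg_threshold", "bg_threshold", "noise_removal_area", "hole_removal_area", "dilate_size", "erode_size"].filter
      (fun p => (pvLookupB parameters p).isNone)
  match missing with
  | p :: _ => (false, "缺少必要參數: " ++ p)
  | [] =>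
    pvRunPlan parameters
      [ .nonempty fg_color_blocks "至少需要一個前景顏色",
        .nonempty bg_color_blocks "至少需要一個背景顏色",
        .range "fg_threshold" 100 "前景閾值必須在 0-100 範圍內",
        .range "bg_threshold" 100 "背景閾值必須在 0-100 範圍內",
        .less "fg_threshold" "bg_threshold" "前景閾值必須小於背景閾值",
        .range "dilate_size" 20 "擴張大小必須在 0-20 範圍內",
        .range "erode_size" 20 "侵蝕大小必須在 0-20 範圍內" ]

-- ===== PRECONDITION & SPEC =====
def Spec_validate_batch_parameters (parameters : List (String × Int)) (fg_color_blocks : List Int) (bg_color_blocks : List Int) (out : Bool × String) : Prop := out = validate_batch_parameters_alt parameters fg_color_blocks bg_color_blocks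
instance (parameters : List (String × Int)) (fg_color_blocks : List Int) (bg_color_blocks : List Int) (out : Bool × String) : Decidable (Spec_validate_batch_parameters parameters fg_color_blocks bg_color_blocks out) := by unfold Spec_validate_batch_parameters; infer_instance

-- ===== CLAIM (what is proved, stated in full; the proofs are below) =====
def Claim_equal_validate_batch_parameters : Prop := ∀ (parameters : List (String × Int)) (fg_color_blocks : List Int) (bg_color_blocks : List Int), Dom_validate_batch_parameters parameters fg_color_blocks bg_color_blocks → Spec_validate_batch_parameters parameters fg_color_blocks bg_color_blocks (validate_batch_parameters parameters fg_color_blocks bg_color_blocks)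

-- ===== LEMMAS AND PROOFS =====
-- A's early-return required-params loop returns the first missing key, i.e. the head of B's filter
theorem pvRequiredLoopA_eq_filter (d : List (String × Int)) (l : List String) :
    pvRequiredLoopA d l =
      match l.filter (fun p => (pvLookupA d p).isNone) with
      | p :: _ => some (false, "缺少必要參數: " ++ p)
      | [] => none := by
  induction l with
  | nil => rfl
  | cons p rest ih =>
    by_cases h : (pvLookupA d p).isNone = true
    · simp [pvRequiredLoopA, List.filter, h]
    · simp [pvRequiredLoopA, List.filter, h, ih]

-- ===== VERDICT (by name: the statement is the Claim_ definition above) =====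
theorem validate_batch_parameters_spec : Claim_equal_validate_batch_parameters := by
  intro parameters fg bg _hdom
  unfold Spec_validate_batch_parameters validate_batch_parameters validate_batch_parameters_alt
  rw [pvRequiredLoopA_eq_filter]
  have hlk : pvLookupA = pvLookupB := rfl
  rw [hlk]
  cases h : ["channel", "fg_threshold", "bg_threshold", "noise_removal_area", "hole_removal_area", "dilate_size", "erode_size"].filter
      (fun p => (pvLookupB parameters p).isNone) with
  | cons p rest => rfl
  | nil =>
    simp only [pvRunPlan, List.isEmpty_iff, Bool.not_eq_true',
      decide_eq_false_iff_not, not_and, not_le, not_lt, ge_iff_le, List.length_pos_iff]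
    split_ifs <;> first | rfl | (exfalso; omega) | simp_all
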